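-- pv_equiv track=rewrite | github.com/rynald0cst0ltziam/erdos-sunflower-decay | sunflower_engine.py | _find_disjoint
-- ===== SOURCE A (Python) =====
-- def _find_disjoint(petals_with_ids, target_k):
--     """Find target_k disjoint petals using backtracking."""
--     def backtrack(start_idx, current_petals_ids, combined_elements):
--         if len(current_petals_ids) == target_k:
--             return current_petals_ids
--
--         for i in range(start_idx, len(petals_with_ids)):
--             petal, sid = petals_with_ids[i]
--             if petal.isdisjoint(combined_elements):
--                 res = backtrack(i + 1, current_petals_ids + [sid], combined_elements | petal)
--                 if res:
--                     return res
--         return None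
--
--     return backtrack(0, [], set())
-- ===== SOURCE B (Python) =====
-- def _find_disjoint(petals_with_ids, target_k):
--     """Find target_k disjoint petals via iterative DFS with an explicit stack."""
--     stack = [(0, [], set())]
--     while stack:
--         start_idx, ids, combined = stack.pop()
--         if len(ids) == target_k:
--             return ids
--         for i in range(len(petals_with_ids) - 1, start_idx - 1, -1):
--             petal, sid = petals_with_ids[i]
--             if petal.isdisjoint(combined):
--                 stack.append((i + 1, ids + [sid], combined | petal))
--     return None
-- ===== Notes on version B (the rewrite author's own statement) =====
-- stated objective: alternative
-- what changed: Replaced the nested recursive backtracking function with an iterative depth-first search over an explicit stack of (start_idx, ids, combined-set) states, pushing extensions in reverse index order so the same first solution is found.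
import Mathlib
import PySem

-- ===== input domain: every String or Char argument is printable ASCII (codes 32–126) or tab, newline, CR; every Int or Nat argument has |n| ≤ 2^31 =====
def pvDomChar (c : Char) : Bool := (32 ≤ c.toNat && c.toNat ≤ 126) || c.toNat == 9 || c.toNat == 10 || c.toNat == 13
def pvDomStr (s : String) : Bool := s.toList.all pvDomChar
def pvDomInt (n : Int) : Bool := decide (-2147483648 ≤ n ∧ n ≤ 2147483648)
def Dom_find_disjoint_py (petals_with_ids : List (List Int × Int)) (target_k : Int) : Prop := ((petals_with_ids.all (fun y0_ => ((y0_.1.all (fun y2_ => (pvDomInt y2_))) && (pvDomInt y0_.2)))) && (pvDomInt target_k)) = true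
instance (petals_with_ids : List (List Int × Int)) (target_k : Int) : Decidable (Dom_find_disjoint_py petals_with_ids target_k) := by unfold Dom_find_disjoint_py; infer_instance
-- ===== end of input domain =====

-- B replaces A's recursive backtracking by an explicit-stack iterative DFS (same
-- first-found answer; objective: alternative decomposition, not claimed faster).

-- ===== PORT A =====
-- A's recursive backtracking.  The index loop 'for i in range(start_idx, len)' is
-- transcribed as recursion over the SUFFIX petals_with_ids[start_idx:], carrying the
-- same state (current ids, combined element set).  'if res:' is ported faithfully:
-- a returned list is truthy iff nonempty.
mutual
def pvA_backtrack (target_k : Int) (suffix : List (List Int × Int))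
    (cur : List Int) (comb : PySem.Set Int) : Option (List Int) :=
  if (cur.length : Int) = target_k then some cur
  else pvA_loop target_k suffix cur comb
termination_by 2 * suffix.length + 1

def pvA_loop (target_k : Int) (suffix : List (List Int × Int))
    (cur : List Int) (comb : PySem.Set Int) : Option (List Int) :=
  match suffix with
  | [] => none
  | (petal, sid) :: rest =>
    if PySem.Set.isdisjoint petal comb then
      match pvA_backtrack target_k rest (cur ++ [sid]) (PySem.Set.union comb petal) with
      | some res => if res ≠ [] then some res else pvA_loop target_k rest cur comb
      | none => pvA_loop target_k rest cur comb
    else pvA_loop target_k rest cur comb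
termination_by 2 * suffix.length
end

def find_disjoint_py (petals_with_ids : List (List Int × Int)) (target_k : Int) : Option (List Int) :=
  pvA_backtrack target_k petals_with_ids [] PySem.Set.empty

-- ===== PORT B =====
-- B's iterative DFS.  A stack state is (remaining suffix = petals from start_idx,
-- chosen ids, combined set); B's Python pushes children in decreasing index order so
-- the head of the Lean stack list (= top of stack) is the smallest index, i.e. the
-- final stack after one pop is (children in increasing index order) ++ old stack.
abbrev PvState := List (List Int × Int) × List Int × PySem.Set Int

def pvB_children (suffix : List (List Int × Int)) (ids : List Int)
    (comb : PySem.Set Int) : List PvState :=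
  match suffix with
  | [] => []
  | (petal, sid) :: rest =>
    (if PySem.Set.isdisjoint petal comb
       then [(rest, ids ++ [sid], PySem.Set.union comb petal)] else [])
    ++ pvB_children rest ids comb

def pvStateW (s : PvState) : Nat := 2 ^ s.1.length

theorem pvB_children_weight (suffix : List (List Int × Int)) (ids : List Int)
    (comb : PySem.Set Int) :
    ((pvB_children suffix ids comb).map pvStateW).sum < 2 ^ suffix.length := by
  induction suffix generalizing ids comb with
  | nil => simp [pvB_children]
  | cons h rest ih =>
    obtain ⟨petal, sid⟩ := h
    simp only [pvB_children, List.map_append, List.sum_append]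
    have h1 := ih (ids ++ [sid]) (PySem.Set.union comb petal)
    have h2 := ih ids comb
    have hpow : 2 ^ ((petal, sid) :: rest : List (List Int × Int)).length
        = 2 ^ rest.length + 2 ^ rest.length := by
      simp [List.length_cons, pow_succ]; ring
    rw [hpow]
    split_ifs with hd
    · simp only [List.map_cons, List.sum_cons, List.map_nil, List.sum_nil, pvStateW]
      omega
    · simp only [List.map_nil, List.sum_nil]
      omega

def pvB_run (target_k : Int) (stack : List PvState) : Option (List Int) :=
  match stack with
  | [] => none
  | (suffix, ids, comb) :: st =>
    if (ids.length : Int) = target_k then some ids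
    else pvB_run target_k (pvB_children suffix ids comb ++ st)
termination_by (stack.map pvStateW).sum
decreasing_by
  simp only [List.map_append, List.sum_append, List.map_cons, List.sum_cons]
  have := pvB_children_weight suffix ids comb
  simp only [pvStateW]
  omega

def find_disjoint_py_alt (petals_with_ids : List (List Int × Int)) (target_k : Int) : Option (List Int) :=
  pvB_run target_k [(petals_with_ids, [], PySem.Set.empty)]

-- ===== PRECONDITION & SPEC =====
def Spec_find_disjoint_py (petals_with_ids : List (List Int × Int)) (target_k : Int) (out : Option (List Int)) : Prop := out = find_disjoint_py_alt petals_with_ids target_k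
instance (petals_with_ids : List (List Int × Int)) (target_k : Int) (out : Option (List Int)) : Decidable (Spec_find_disjoint_py petals_with_ids target_k out) := by unfold Spec_find_disjoint_py; infer_instance

-- ===== CLAIM (what is proved, stated in full; the proofs are below) =====
def Claim_equal_find_disjoint_py : Prop := ∀ (petals_with_ids : List (List Int × Int)) (target_k : Int), Dom_find_disjoint_py petals_with_ids target_k → Spec_find_disjoint_py petals_with_ids target_k (find_disjoint_py petals_with_ids target_k)

-- ===== LEMMAS AND PROOFS =====

-- Any 'some r' produced by A's backtracking extends the current id list (so a result
-- returned to a loop iteration is nonempty and the 'if res:' test always passes).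
theorem pvA_some_prefix (target_k : Int) :
    ∀ (suffix : List (List Int × Int)) (cur : List Int) (comb : PySem.Set Int) (r : List Int),
      (pvA_backtrack target_k suffix cur comb = some r → cur <+: r) ∧
      (pvA_loop target_k suffix cur comb = some r → cur <+: r) := by
  intro suffix
  induction suffix with
  | nil =>
    intro cur comb r
    constructor
    · intro h
      rw [pvA_backtrack] at h
      split at h
      · exact (Option.some.inj h) ▸ List.prefix_refl cur
      · simp [pvA_loop] at h
    · intro h; simp [pvA_loop] at h
  | cons hd rest ih =>
    intro cur comb r
    obtain ⟨petal, sid⟩ := hd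
    have hloop : pvA_loop target_k ((petal, sid) :: rest) cur comb = some r → cur <+: r := by
      intro h
      rw [pvA_loop] at h
      split_ifs at h with hd
      · cases hbt : pvA_backtrack target_k rest (cur ++ [sid]) (PySem.Set.union comb petal) with
        | some res =>
          rw [hbt] at h
          by_cases hne : res = []
          · simp only [ne_eq, hne, not_true_eq_false, if_false] at h
            exact (ih cur comb r).2 h
          · simp only [ne_eq, hne, not_false_eq_true, if_true, Option.some.injEq] at h
            have h1 : (cur ++ [sid]) <+: res := (ih (cur ++ [sid]) (PySem.Set.union comb petal) res).1 hbt
            exact List.IsPrefix.trans (List.prefix_append cur [sid]) (h ▸ h1)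
        | none =>
          rw [hbt] at h
          exact (ih cur comb r).2 h
      · exact (ih cur comb r).2 h
    constructor
    · intro h
      rw [pvA_backtrack] at h
      split at h
      · exact (Option.some.inj h) ▸ List.prefix_refl cur
      · exact hloop h
    · exact hloop

-- firstA: run A's backtracking on each stack state in turn, first success wins.
def pvFirstA (target_k : Int) (stack : List PvState) : Option (List Int) :=
  match stack with
  | [] => none
  | (suffix, ids, comb) :: st =>
    match pvA_backtrack target_k suffix ids comb with
    | some r => some r
    | none => pvFirstA target_k st

theorem pvLoop_eq (target_k : Int) (suffix : List (List Int × Int)) (ids : List Int)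
    (comb : PySem.Set Int) (st : List PvState) :
    pvFirstA target_k (pvB_children suffix ids comb ++ st)
      = match pvA_loop target_k suffix ids comb with
        | some r => some r
        | none => pvFirstA target_k st := by
  induction suffix with
  | nil => simp [pvB_children, pvA_loop]
  | cons hd rest ih =>
    obtain ⟨petal, sid⟩ := hd
    rw [pvB_children, pvA_loop]
    split_ifs with hd
    · rw [List.append_assoc]
      show pvFirstA target_k ((rest, ids ++ [sid], PySem.Set.union comb petal) :: (pvB_children rest ids comb ++ st)) = _
      rw [pvFirstA]
      cases hbt : pvA_backtrack target_k rest (ids ++ [sid]) (PySem.Set.union comb petal) with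
      | some res =>
        have hpre : (ids ++ [sid]) <+: res :=
          (pvA_some_prefix target_k rest (ids ++ [sid]) (PySem.Set.union comb petal) res).1 hbt
        have hne : res ≠ [] := by
          intro he
          subst he
          simp [List.prefix_nil] at hpre
        simp [if_pos hne]
      | none =>
        exact ih
    · simp only [List.nil_append]
      exact ih

theorem pvRun_eq (target_k : Int) (stack : List PvState) :
    pvB_run target_k stack = pvFirstA target_k stack := by
  fun_induction pvB_run target_k stack with
  | case1 => rfl
  | case2 suffix ids comb st heq =>
    rw [pvFirstA, pvA_backtrack, if_pos heq]
  | case3 suffix ids comb st heq ih =>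
    rw [ih, pvLoop_eq, pvFirstA, pvA_backtrack, if_neg heq]

-- ===== VERDICT (by name: the statement is the Claim_ definition above) =====
theorem find_disjoint_py_spec : Claim_equal_find_disjoint_py := by
  intro petals target_k _
  unfold Spec_find_disjoint_py find_disjoint_py find_disjoint_py_alt
  rw [pvRun_eq]
  simp only [pvFirstA]
  cases pvA_backtrack target_k petals [] PySem.Set.empty <;> rfl
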